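-- pv_equiv track=rewrite | github.com/Mark0025/PeteRental_vapi_10_02_25 | rental_database.py | _has_data_changed
-- ===== SOURCE A (Python) =====
-- from typing import List, Dict, Any
--
-- def _has_data_changed(existing: Dict[str, Any], new: Dict[str, Any]) -> bool:
--     """Check if rental data has changed significantly"""
--     # Compare all fields to see if anything important changed
--     important_fields = ['price', 'available_date', 'amenities', 'description']
--
--     for field in important_fields:
--         if field in existing and field in new:
--             if str(existing[field]) != str(new[field]):
--                 return True
--         elif field in existing or field in new:
--             return True
--
--     return False
-- ===== SOURCE B (Python) =====
-- def _has_data_changed(existing, new):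
--     """Check if rental data has changed significantly"""
--     important_fields = ['price', 'available_date', 'amenities', 'description']
--     a = {f: str(existing[f]) for f in important_fields if f in existing}
--     b = {f: str(new[f]) for f in important_fields if f in new}
--     return a != b
-- ===== Notes on version B (the rewrite author's own statement) =====
-- stated objective: simpler
-- what changed: Replaces the short-circuiting per-field presence/value branch loop with building two dicts restricted to the important fields and returning a single 'a != b' comparison.
import Mathlib
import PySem

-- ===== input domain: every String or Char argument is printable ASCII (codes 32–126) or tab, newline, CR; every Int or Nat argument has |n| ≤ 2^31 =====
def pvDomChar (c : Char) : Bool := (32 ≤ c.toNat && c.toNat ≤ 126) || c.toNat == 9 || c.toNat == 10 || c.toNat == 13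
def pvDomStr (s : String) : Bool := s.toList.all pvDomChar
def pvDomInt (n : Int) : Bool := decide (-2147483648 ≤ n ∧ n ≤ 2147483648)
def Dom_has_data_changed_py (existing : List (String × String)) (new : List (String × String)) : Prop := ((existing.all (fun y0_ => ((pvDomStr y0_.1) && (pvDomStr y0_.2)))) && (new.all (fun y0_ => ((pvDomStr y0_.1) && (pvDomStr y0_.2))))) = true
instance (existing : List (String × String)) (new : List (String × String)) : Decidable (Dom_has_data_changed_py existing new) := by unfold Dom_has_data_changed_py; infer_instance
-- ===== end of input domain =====

-- B replaces A's short-circuiting per-field loop with building the two field-restricted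
-- dicts and comparing them with a single '!=' (objective: simpler).


-- ===== PORT A =====
-- 'field in d' together with 'str(d[field])' (values are strings, so str() is the
-- identity) is the first-match association-list lookup: some v ↔ the key is present.
def hdcFields : List String := ["price", "available_date", "amenities", "description"]

-- the 'for field in important_fields' loop with its early returns
def hdcLoopA (existing : List (String × String)) (new : List (String × String)) :
    List String → Bool
  | [] => false
  | f :: rest =>
    match existing.lookup f, new.lookup f with
    | some a, some b => if a != b then true else hdcLoopA existing new rest
    | none, none => hdcLoopA existing new rest
    | _, _ => true

def has_data_changed_py (existing : List (String × String)) (new : List (String × String)) : Bool :=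
  hdcLoopA existing new hdcFields

-- ===== PORT B =====
-- {f: str(d[f]) for f in important_fields if f in d}: both comprehensions run over the
-- same (duplicate-free) field list, so Python's order-insensitive dict '!=' is exactly
-- inequality of the two item lists built in that order.
def hdcProj (d : List (String × String)) (fields : List String) : List (String × String) :=
  fields.filterMap (fun f => (d.lookup f).map (fun v => (f, v)))

def has_data_changed_py_alt (existing : List (String × String)) (new : List (String × String)) : Bool :=
  hdcProj existing hdcFields != hdcProj new hdcFields

-- ===== PRECONDITION & SPEC =====
def Spec_has_data_changed_py (existing : List (String × String)) (new : List (String × String)) (out : Bool) : Prop := out = has_data_changed_py_alt existing new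
instance (existing : List (String × String)) (new : List (String × String)) (out : Bool) : Decidable (Spec_has_data_changed_py existing new out) := by unfold Spec_has_data_changed_py; infer_instance

-- ===== CLAIM (what is proved, stated in full; the proofs are below) =====
def Claim_equal_has_data_changed_py : Prop := ∀ (existing : List (String × String)) (new : List (String × String)), Dom_has_data_changed_py existing new → Spec_has_data_changed_py existing new (has_data_changed_py existing new)

-- ===== LEMMAS AND PROOFS =====

-- every key of the projection comes from the field list
theorem hdcProj_key_mem {d : List (String × String)} {fields : List String}
    {k v : String} (h : (k, v) ∈ hdcProj d fields) : k ∈ fields := by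
  unfold hdcProj at h
  rcases List.mem_filterMap.1 h with ⟨f, hf, hmap⟩
  rcases Option.map_eq_some_iff.1 hmap with ⟨w, _, hw⟩
  cases hw
  exact hf

-- the loop of A computes inequality of the two projections, for any duplicate-free field list
theorem hdcLoopA_eq (existing new : List (String × String)) :
    ∀ fields : List String, fields.Nodup →
      hdcLoopA existing new fields = (hdcProj existing fields != hdcProj new fields) := by
  intro fields hnd
  induction fields with
  | nil => simp [hdcLoopA, hdcProj]
  | cons f rest ih =>
    have hfr : f ∉ rest := (List.nodup_cons.1 hnd).1
    have ihr := ih (List.nodup_cons.1 hnd).2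
    cases he : existing.lookup f <;> cases hn : new.lookup f <;>
      simp [hdcLoopA, hdcProj, he, hn, List.filterMap] at ihr ⊢
    · -- none, none
      exact ihr
    · -- none, some : A returns true; head (f, b) of the new side cannot occur in the old side
      rename_i b
      intro hEq
      refine hfr (hdcProj_key_mem (d := existing) (fields := rest) (v := b) ?_)
      unfold hdcProj; rw [hEq]; exact List.mem_cons_self
    · -- some, none
      rename_i a
      intro hEq
      refine hfr (hdcProj_key_mem (d := new) (fields := rest) (v := a) ?_)
      unfold hdcProj; rw [← hEq]; exact List.mem_cons_self
    · -- some a, some b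
      rename_i a b
      by_cases hab : a = b
      · subst hab
        rw [ihr]
        simp [bne, List.cons_beq_cons]
      · simp [hab, bne_iff_ne]

-- ===== VERDICT (by name: the statement is the Claim_ definition above) =====
theorem has_data_changed_py_spec : Claim_equal_has_data_changed_py := by
  intro existing new _
  unfold Spec_has_data_changed_py has_data_changed_py has_data_changed_py_alt
  exact hdcLoopA_eq existing new hdcFields (by decide)
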